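-- pv_equiv track=rewrite | github.com/weiminggao/wangyi_competition | Code/bin/model/cascade_model/test.py | convert_to_num_str
-- ===== SOURCE A (Python) =====
-- def convert_to_num_str(tags):
--     num_str = []
--     for i in range(len(tags)):
--         if tags[i] == 3:#表示B
--             start_flag = str(i)
--             j = i + 1
--             while j < len(tags) \
--             and tags[j] != 0 \
--             and tags[j] != 3:
--                 j += 1
--             start_flag += str(j)
--             num_str.append(start_flag)
--     return num_str
-- ===== SOURCE B (Python) =====
-- def convert_to_num_str(tags):
--     # One right-to-left pass: maintain `stop` = index of the next tag in {0,3}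
--     # at or after the current position+1 (or len(tags)); emit on each B (tag 3).
--     stop = len(tags)
--     out = []
--     for i in range(len(tags) - 1, -1, -1):
--         t = tags[i]
--         if t == 3:
--             out.append(str(i) + str(stop))
--         if t == 0 or t == 3:
--             stop = i
--     out.reverse()
--     return out
-- ===== Notes on version B (the rewrite author's own statement) =====
-- stated objective: alternative
-- what changed: Replaces the per-B forward while-scan with a single right-to-left pass that carries the next-stop index, emitting each span from that running value.
import Mathlib
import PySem

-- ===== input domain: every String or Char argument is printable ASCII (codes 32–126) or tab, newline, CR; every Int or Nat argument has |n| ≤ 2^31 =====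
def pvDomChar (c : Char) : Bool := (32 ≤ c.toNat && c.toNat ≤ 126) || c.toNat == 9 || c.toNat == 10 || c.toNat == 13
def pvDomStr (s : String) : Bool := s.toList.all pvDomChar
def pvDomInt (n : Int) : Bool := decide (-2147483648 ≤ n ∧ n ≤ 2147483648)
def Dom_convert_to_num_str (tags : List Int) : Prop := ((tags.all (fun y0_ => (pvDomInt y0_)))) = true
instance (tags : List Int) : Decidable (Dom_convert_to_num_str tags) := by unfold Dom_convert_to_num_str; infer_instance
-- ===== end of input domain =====

-- B replaces A's per-B forward while-scan with one right-to-left pass carrying the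
-- next-stop index (alternative decomposition); equality of return values is proved below.


-- ===== PORT A =====
-- inner 'while j < len(tags) and tags[j] != 0 and tags[j] != 3: j += 1'
def whileJ (tags : List Int) (j : Int) : Int :=
  if h : j < (tags.length : Int) ∧ PySem.List.pyGet? tags j ≠ some 0 ∧ PySem.List.pyGet? tags j ≠ some 3 then
    whileJ tags (j + 1)
  else j
termination_by ((tags.length : Int) - j).toNat
decreasing_by omega

def convert_to_num_str (tags : List Int) : List String :=
  (PySem.List.pyRange 0 (tags.length : Int) 1).foldl
    (fun num_str i =>
      if PySem.List.pyGet? tags i = some 3 then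
        num_str ++ [PySem.Int.toStr i ++ PySem.Int.toStr (whileJ tags (i + 1))]
      else num_str) []

-- ===== PORT B =====
-- backward loop of Source B as structural recursion on the suffix starting at index k:
-- first component = running `stop`, second = `out` (already in forward order)
def goB : List Int → Int → Int × List String
  | [], k => (k, [])
  | t :: rest, k =>
    let p := goB rest (k + 1)
    ((if t = 0 ∨ t = 3 then k else p.1),
     if t = 3 then (PySem.Int.toStr k ++ PySem.Int.toStr p.1) :: p.2 else p.2)

def convert_to_num_str_alt (tags : List Int) : List String := (goB tags 0).2

-- ===== PRECONDITION & SPEC =====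
def Spec_convert_to_num_str (tags : List Int) (out : List String) : Prop := out = convert_to_num_str_alt tags
instance (tags : List Int) (out : List String) : Decidable (Spec_convert_to_num_str tags out) := by unfold Spec_convert_to_num_str; infer_instance

-- ===== CLAIM (what is proved, stated in full; the proofs are below) =====
def Claim_equal_convert_to_num_str : Prop := ∀ (tags : List Int), Dom_convert_to_num_str tags → Spec_convert_to_num_str tags (convert_to_num_str tags)

-- ===== LEMMAS AND PROOFS =====

-- A's while-scan from index m equals B's running stop for the suffix starting at m.
theorem whileJ_eq (whole : List Int) :
    ∀ (suf : List Int) (m : Nat), whole.drop m = suf →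
      whileJ whole (m : Int) = (goB suf (m : Int)).1 := by
  intro suf
  induction suf with
  | nil =>
    intro m hd
    have hlen : whole.length ≤ m := by
      simpa [List.drop_eq_nil_iff] using hd
    rw [whileJ]
    simp [goB]
    omega
  | cons t rest ih =>
    intro m hd
    have hm : m < whole.length := by
      by_contra h
      simp [List.drop_eq_nil_iff.mpr (by omega : whole.length ≤ m)] at hd
    have hget : whole[m]? = some t := by
      have h0 : (whole.drop m)[0]? = some t := by simp [hd]
      rw [List.getElem?_drop] at h0
      simpa using h0
    have hpy : PySem.List.pyGet? whole (m : Int) = some t := by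
      simp [PySem.List.pyGet?_natCast, hget]
    have hrest : whole.drop (m + 1) = rest := by
      have h1 : whole.drop (m + 1) = (whole.drop m).drop 1 := by
        rw [List.drop_drop]
      simp [h1, hd]
    have hcast : ((m + 1 : Nat) : Int) = (m : Int) + 1 := by push_cast; ring
    rw [whileJ]
    by_cases h3 : t = 3
    · simp [goB, hpy, h3]
    · by_cases h0 : t = 0
      · simp [goB, hpy, h0]
      · have hcond : (m : Int) < (whole.length : Int) ∧
            PySem.List.pyGet? whole (m : Int) ≠ some 0 ∧
            PySem.List.pyGet? whole (m : Int) ≠ some 3 := by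
          refine ⟨by exact_mod_cast hm, ?_, ?_⟩ <;> simp [hpy, h0, h3]
        rw [dif_pos hcond, ← hcast, ih (m + 1) hrest]
        simp only [goB]
        rw [if_neg (by simp [h0, h3]), hcast]

-- A's outer fold from index m equals acc ++ B's emitted list for the suffix starting at m.
theorem foldA_eq (whole : List Int) :
    ∀ (suf : List Int) (m : Nat) (acc : List String), whole.drop m = suf →
      (PySem.List.pyRange (m : Int) (whole.length : Int) 1).foldl
        (fun num_str i =>
          if PySem.List.pyGet? whole i = some 3 then
            num_str ++ [PySem.Int.toStr i ++ PySem.Int.toStr (whileJ whole (i + 1))]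
          else num_str) acc
      = acc ++ (goB suf (m : Int)).2 := by
  intro suf
  induction suf with
  | nil =>
    intro m acc hd
    have hlen : whole.length ≤ m := by
      simpa [List.drop_eq_nil_iff] using hd
    have hr : PySem.List.pyRange (m : Int) (whole.length : Int) 1 = [] := by
      rw [PySem.List.pyRange_one]
      have h0 : ((whole.length : Int) - (m : Int)).toNat = 0 := by omega
      simp [h0]
    simp [hr, goB]
  | cons t rest ih =>
    intro m acc hd
    have hm : m < whole.length := by
      by_contra h
      simp [List.drop_eq_nil_iff.mpr (by omega : whole.length ≤ m)] at hd
    have hget : whole[m]? = some t := by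
      have h0 : (whole.drop m)[0]? = some t := by simp [hd]
      rw [List.getElem?_drop] at h0
      simpa using h0
    have hpy : PySem.List.pyGet? whole (m : Int) = some t := by
      simp [PySem.List.pyGet?_natCast, hget]
    have hrest : whole.drop (m + 1) = rest := by
      have h1 : whole.drop (m + 1) = (whole.drop m).drop 1 := by
        rw [List.drop_drop]
      simp [h1, hd]
    have hcast : ((m + 1 : Nat) : Int) = (m : Int) + 1 := by push_cast; ring
    rw [PySem.List.pyRange_one_cons (by exact_mod_cast hm)]
    simp only [List.foldl_cons, hpy]
    rw [← hcast, ih (m + 1) _ hrest, whileJ_eq whole rest (m + 1) hrest]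
    simp only [goB]
    rw [hcast]
    by_cases h3 : t = 3
    · simp [h3, List.append_assoc]
    · simp [h3]

-- ===== VERDICT (by name: the statement is the Claim_ definition above) =====
theorem convert_to_num_str_spec : Claim_equal_convert_to_num_str := by
  intro tags _
  unfold Spec_convert_to_num_str convert_to_num_str convert_to_num_str_alt
  have := foldA_eq tags tags 0 [] (by simp)
  simpa using this
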